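-- pv_equiv track=rewrite | github.com/TalitaGroetzinger/COLING | get-context/get-context-tryout.py | get_line_and_file
-- ===== SOURCE A (Python) =====
-- def get_line_and_file(filename, line_nr, collection):
--     # get current_line
--     current_line = collection[filename][line_nr]
--     # make a list of all line numbers
--     sentence_nrs = [key for key, _ in collection[filename].items()]
--     list_positions = [i for i in range(len(sentence_nrs))]
--     # get the index of the line before and after
--     window_range = [1, 2, 3, 4, 5]
--     sents_before_current = []
--     sents_after_current = []
--     for window in window_range:
--         previous_line_index = sentence_nrs.index(line_nr)-window
--         next_line_index = sentence_nrs.index(line_nr)+window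
--         if previous_line_index in list_positions:
--             previous_line_pos = sentence_nrs[previous_line_index]
--             previous_line = collection[filename][previous_line_pos]
--             sents_before_current.append(previous_line)
--
--         if next_line_index in list_positions:
--             next_line_pos = sentence_nrs[next_line_index]
--             next_line = collection[filename][next_line_pos]
--             sents_after_current.append(next_line)
--     sents_before_current.reverse()
--     full_context = sents_before_current + [current_line] + sents_after_current
--     return full_context
-- ===== SOURCE B (Python) =====
-- def get_line_and_file(filename, line_nr, collection):
--     file_lines = collection[filename]
--     keys = list(file_lines)
--     pos = keys.index(line_nr)
--     before = [file_lines[k] for k in keys[max(0, pos - 5):pos]]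
--     after = [file_lines[k] for k in keys[pos + 1:pos + 6]]
--     return before + [file_lines[line_nr]] + after
-- ===== Notes on version B (the rewrite author's own statement) =====
-- stated objective: simpler
-- what changed: Replaces A's window-offset loop (five iterations testing membership of pos±w in a positions list, appending, then reversing the 'before' list) with two direct slices of the key list around pos, mapped to their values.
import Mathlib
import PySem

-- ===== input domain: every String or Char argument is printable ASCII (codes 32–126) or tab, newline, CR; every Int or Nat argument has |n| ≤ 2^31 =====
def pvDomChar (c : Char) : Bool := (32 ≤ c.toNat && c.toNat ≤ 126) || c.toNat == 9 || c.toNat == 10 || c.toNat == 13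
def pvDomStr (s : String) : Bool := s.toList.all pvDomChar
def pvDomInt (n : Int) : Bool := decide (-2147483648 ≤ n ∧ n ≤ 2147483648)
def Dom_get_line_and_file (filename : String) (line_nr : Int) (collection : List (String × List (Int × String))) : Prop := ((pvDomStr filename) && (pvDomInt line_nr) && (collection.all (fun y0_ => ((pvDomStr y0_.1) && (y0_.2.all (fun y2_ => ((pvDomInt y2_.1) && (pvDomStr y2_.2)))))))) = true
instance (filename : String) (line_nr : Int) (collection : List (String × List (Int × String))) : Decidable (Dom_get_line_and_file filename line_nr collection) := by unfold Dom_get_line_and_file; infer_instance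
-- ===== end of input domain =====

-- B builds the ±5-line window by slicing the key list around the position of line_nr instead of
-- A's offset loop with a membership bounds test; same return value, simpler decomposition.

-- ===== PORT A =====
-- A's '1,2,3,4,5' window loop, its 'index in list_positions' bounds test and the final reverse,
-- transliterated step for step; dict lookups that Pre_ guarantees succeed use the total getD form.
def get_line_and_file (filename : String) (line_nr : Int) (collection : List (String × List (Int × String))) : List String :=
  let fdict := PySem.Dict.ofList ((PySem.Dict.ofList collection).getD filename [])
  let current_line := fdict.getD line_nr ""
  let sentence_nrs := fdict.keys
  let list_positions := PySem.List.pyRange 0 (PySem.List.len sentence_nrs) 1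
  let st := [(1 : Int), 2, 3, 4, 5].foldl (fun (st : List String × List String) window =>
      (if ((((PySem.List.index? sentence_nrs line_nr).getD 0 : Nat) : Int) - window) ∈ list_positions then
         st.1 ++ [fdict.getD (PySem.List.pyGetD sentence_nrs ((((PySem.List.index? sentence_nrs line_nr).getD 0 : Nat) : Int) - window) 0) ""]
       else st.1,
       if ((((PySem.List.index? sentence_nrs line_nr).getD 0 : Nat) : Int) + window) ∈ list_positions then
         st.2 ++ [fdict.getD (PySem.List.pyGetD sentence_nrs ((((PySem.List.index? sentence_nrs line_nr).getD 0 : Nat) : Int) + window) 0) ""]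
       else st.2)) ([], [])
  st.1.reverse ++ [current_line] ++ st.2

-- ===== PORT B =====
def get_line_and_file_alt (filename : String) (line_nr : Int) (collection : List (String × List (Int × String))) : List String :=
  let file_lines := PySem.Dict.ofList ((PySem.Dict.ofList collection).getD filename [])
  let keys := file_lines.keys
  let pos : Int := (((PySem.List.index? keys line_nr).getD 0 : Nat) : Int)
  let before := (PySem.List.slice keys (some (max 0 (pos - 5))) (some pos)).map (fun k => file_lines.getD k "")
  let after := (PySem.List.slice keys (some (pos + 1)) (some (pos + 6))).map (fun k => file_lines.getD k "")
  before ++ [file_lines.getD line_nr ""] ++ after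

-- ===== PRECONDITION & SPEC =====
-- Pre_ excludes exactly the inputs where the Python A raises: a filename absent from the outer
-- dict or a line_nr absent from that file's dict (KeyError on the first two lookups).
def Pre_get_line_and_file (filename : String) (line_nr : Int) (collection : List (String × List (Int × String))) : Prop :=
  (((PySem.Dict.ofList collection).get? filename).map
    (fun lst => (PySem.Dict.ofList lst).contains line_nr)).getD false = true
instance (filename : String) (line_nr : Int) (collection : List (String × List (Int × String))) : Decidable (Pre_get_line_and_file filename line_nr collection) := by unfold Pre_get_line_and_file; infer_instance

def pvWitness_get_line_and_file : String × Int × (List (String × List (Int × String))) :=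
  ("f", 1, [("f", [(1, "a"), (2, "b")])])

def Spec_get_line_and_file (filename : String) (line_nr : Int) (collection : List (String × List (Int × String))) (out : List String) : Prop := out = get_line_and_file_alt filename line_nr collection
instance (filename : String) (line_nr : Int) (collection : List (String × List (Int × String))) (out : List String) : Decidable (Spec_get_line_and_file filename line_nr collection out) := by unfold Spec_get_line_and_file; infer_instance

-- ===== CLAIM (what is proved, stated in full; the proofs are below) =====
def Claim_equal_get_line_and_file : Prop := ∀ (filename : String) (line_nr : Int) (collection : List (String × List (Int × String))), Dom_get_line_and_file filename line_nr collection → Pre_get_line_and_file filename line_nr collection → Spec_get_line_and_file filename line_nr collection (get_line_and_file filename line_nr collection)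

-- ===== LEMMAS AND PROOFS =====

-- glue: List.getD at an omega-provable index equals getElem
lemma getD_eq_getElem' {α : Type} (l : List α) (d : α) {i j : ℕ} (hij : i = j) (hj : j < l.length) :
    l.getD i d = l[j] := by subst hij; exact List.getD_eq_getElem l d hj

-- glue: pyGetD at a nonnegative in-range index equals getElem
lemma pyGetD_eq_getElem' {α : Type} (l : List α) (d : α) {i : Int} {j : ℕ}
    (h0 : 0 ≤ i) (hij : i.toNat = j) (hj : j < l.length) :
    PySem.List.pyGetD l i d = l[j] := by
  subst hij
  exact PySem.List.pyGetD_eq_getElem l d h0 (by omega)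

lemma foldl_before_eq (keys : List Int) (val : Int → String) (pos : Nat) (h : pos < keys.length) :
    (List.foldl (fun acc (w : Int) =>
        if ((pos : Int) - w) ∈ PySem.List.pyRange 0 (PySem.List.len keys) 1 then
          acc ++ [val (PySem.List.pyGetD keys ((pos : Int) - w) 0)]
        else acc) [] [1, 2, 3, 4, 5]).reverse
    = (PySem.List.slice keys (some (max 0 ((pos : Int) - 5))) (some (pos : Int))).map val := by
  rw [PySem.List.slice_toNat keys (le_max_left 0 _) (by omega)]
  have hm : (max 0 ((pos:Int) - 5)).toNat = pos - 5 := by omega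
  have hp : ((pos:Int)).toNat = pos := by omega
  rw [hm, hp]
  simp only [List.foldl_cons, List.foldl_nil,
    PySem.List.mem_pyRange_one, PySem.List.len_eq, List.nil_append]
  split_ifs with h1 h2 h3 h4 h5 <;>
    first
    | omega
    | (apply List.ext_getElem
       · simp; omega
       · intro i hi1 hi2
         simp only [List.getElem_map, List.getElem_take, List.getElem_drop]
         simp only [List.length_reverse, List.length_append, List.length_cons, List.length_nil] at hi1
         first
         | omega
         | (interval_cases i <;> simp <;>
             exact congrArg val (pyGetD_eq_getElem' _ _ (by omega) (by omega) (by omega))))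

lemma foldl_after_eq (keys : List Int) (val : Int → String) (pos : Nat) (h : pos < keys.length) :
    List.foldl (fun acc (w : Int) =>
        if ((pos : Int) + w) ∈ PySem.List.pyRange 0 (PySem.List.len keys) 1 then
          acc ++ [val (PySem.List.pyGetD keys ((pos : Int) + w) 0)]
        else acc) [] [1, 2, 3, 4, 5]
    = (PySem.List.slice keys (some ((pos : Int) + 1)) (some ((pos : Int) + 6))).map val := by
  have e1 : ((pos:Int) + 1) = ((pos + 1 : Nat) : Int) := by push_cast; ring
  have e2 : ((pos:Int) + 2) = ((pos + 2 : Nat) : Int) := by push_cast; ring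
  have e3 : ((pos:Int) + 3) = ((pos + 3 : Nat) : Int) := by push_cast; ring
  have e4 : ((pos:Int) + 4) = ((pos + 4 : Nat) : Int) := by push_cast; ring
  have e5 : ((pos:Int) + 5) = ((pos + 5 : Nat) : Int) := by push_cast; ring
  have e6 : ((pos:Int) + 6) = ((pos + 6 : Nat) : Int) := by push_cast; ring
  simp only [List.foldl_cons, List.foldl_nil, e1, e2, e3, e4, e5, e6,
    PySem.List.mem_pyRange_one, PySem.List.len_eq, PySem.List.pyGetD_natCast,
    PySem.List.slice_natCast, List.nil_append]
  have hst : pos + 6 - (pos + 1) = 5 := by omega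
  rw [hst]
  split_ifs with h1 h2 h3 h4 h5 <;>
    first
    | omega
    | (apply List.ext_getElem
       · simp; omega
       · intro i hi1 hi2
         simp only [List.getElem_map, List.getElem_take, List.getElem_drop]
         simp only [List.length_append, List.length_cons, List.length_nil] at hi1
         first
         | omega
         | (interval_cases i <;> simp <;>
             exact congrArg val (getD_eq_getElem' _ _ (by omega) (by omega))))

-- ===== VERDICT (by name: the statement is the Claim_ definition above) =====
theorem get_line_and_file_spec : Claim_equal_get_line_and_file := by
  intro filename line_nr collection _ hpre
  unfold Pre_get_line_and_file at hpre
  unfold Spec_get_line_and_file get_line_and_file get_line_and_file_alt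
  rcases hg : (PySem.Dict.ofList collection).get? filename with _ | lst
  · rw [hg] at hpre; simp at hpre
  · rw [hg] at hpre; simp at hpre
    have hmem : line_nr ∈ (PySem.Dict.ofList lst).keys := by
      rw [← PySem.Dict.contains_iff_mem_keys]; exact hpre
    rcases hk : PySem.List.index? (PySem.Dict.ofList lst).keys line_nr with _ | k
    · rw [PySem.List.index?_eq_none_iff] at hk; exact absurd hmem hk
    · obtain ⟨hklt, hkey, -⟩ := PySem.List.getElem_of_index?_eq_some hk
      have hgetD : (PySem.Dict.ofList collection).getD filename [] = lst := by
        rw [PySem.Dict.getD_eq_get?_getD, hg]; rfl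
      simp only [hgetD, hk, Option.getD_some]
      rw [show (fun (st : List String × List String) (window : Int) =>
            (if ((k:Int) - window) ∈ PySem.List.pyRange 0 (PySem.List.len (PySem.Dict.ofList lst).keys) 1 then
               st.1 ++ [(PySem.Dict.ofList lst).getD (PySem.List.pyGetD (PySem.Dict.ofList lst).keys ((k:Int) - window) 0) ""]
             else st.1,
             if ((k:Int) + window) ∈ PySem.List.pyRange 0 (PySem.List.len (PySem.Dict.ofList lst).keys) 1 then
               st.2 ++ [(PySem.Dict.ofList lst).getD (PySem.List.pyGetD (PySem.Dict.ofList lst).keys ((k:Int) + window) 0) ""]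
             else st.2))
          = (fun (st : List String × List String) (window : Int) =>
             ((fun (s1 : List String) (window : Int) =>
                if ((k:Int) - window) ∈ PySem.List.pyRange 0 (PySem.List.len (PySem.Dict.ofList lst).keys) 1 then
                  s1 ++ [(PySem.Dict.ofList lst).getD (PySem.List.pyGetD (PySem.Dict.ofList lst).keys ((k:Int) - window) 0) ""]
                else s1) st.1 window,
              (fun (s2 : List String) (window : Int) =>
                if ((k:Int) + window) ∈ PySem.List.pyRange 0 (PySem.List.len (PySem.Dict.ofList lst).keys) 1 then
                  s2 ++ [(PySem.Dict.ofList lst).getD (PySem.List.pyGetD (PySem.Dict.ofList lst).keys ((k:Int) + window) 0) ""]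
                else s2) st.2 window)) from rfl]
      rw [PySem.List.foldl_prod_mk
          (fun (s1 : List String) (window : Int) =>
                if ((k:Int) - window) ∈ PySem.List.pyRange 0 (PySem.List.len (PySem.Dict.ofList lst).keys) 1 then
                  s1 ++ [(PySem.Dict.ofList lst).getD (PySem.List.pyGetD (PySem.Dict.ofList lst).keys ((k:Int) - window) 0) ""]
                else s1)
          (fun (s2 : List String) (window : Int) =>
                if ((k:Int) + window) ∈ PySem.List.pyRange 0 (PySem.List.len (PySem.Dict.ofList lst).keys) 1 then
                  s2 ++ [(PySem.Dict.ofList lst).getD (PySem.List.pyGetD (PySem.Dict.ofList lst).keys ((k:Int) + window) 0) ""]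
                else s2)
          [1,2,3,4,5] [] []]
      simp only [foldl_before_eq (PySem.Dict.ofList lst).keys (fun x => (PySem.Dict.ofList lst).getD x "") k hklt,
                 foldl_after_eq (PySem.Dict.ofList lst).keys (fun x => (PySem.Dict.ofList lst).getD x "") k hklt]
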